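-- pv_equiv track=rewrite | github.com/github991127/Leetcode | test/231014小米/1. X.py | solve
-- ===== SOURCE A (Python) =====
-- def solve(nums, m, n) -> int:
--     count = 0
--     for i in range(0, m - 3 + 1):
--         for j in range(0, n - 3 + 1):
--             xiaomi = {'x': 0, 'i': 0, 'a': 0, 'o': 0, 'm': 0}
--             for x in range(i, i + 3):
--                 for y in range(j, j + 3):
--                     if nums[x][y] in xiaomi:
--                         xiaomi[nums[x][y]] += 1
--             if xiaomi['x'] >= 1 and xiaomi['i'] >= 2 and xiaomi['a'] >= 1 and xiaomi['o'] >= 1 and xiaomi['m'] >= 1: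
--                 count += 1
--     return count
-- ===== SOURCE B (Python) =====
-- def solve(nums, m, n) -> int:
--     # Prefix-sum re-implementation: five (m+1)x(n+1) cumulative-count grids,
--     # then each 3x3 window is answered by 2D inclusion-exclusion.
--     if m < 3 or n < 3:
--         return 0
--
--     def prefix(c):
--         grid = [[0] * (n + 1)]
--         for i in range(m):
--             row = nums[i]
--             prev = grid[i]
--             cur = [0]
--             run = 0
--             for j in range(n):
--                 if row[j] == c:
--                     run += 1
--                 cur.append(prev[j + 1] + run)
--             grid.append(cur)
--         return grid
--
--     gx, gi, ga, go, gm = prefix('x'), prefix('i'), prefix('a'), prefix('o'), prefix('m')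
--
--     def win(g, i, j):
--         return g[i + 3][j + 3] - g[i][j + 3] - g[i + 3][j] + g[i][j]
--
--     count = 0
--     for i in range(m - 2):
--         for j in range(n - 2):
--             if (win(gx, i, j) >= 1 and win(gi, i, j) >= 2 and win(ga, i, j) >= 1
--                     and win(go, i, j) >= 1 and win(gm, i, j) >= 1):
--                 count += 1
--     return count
-- ===== Notes on version B (the rewrite author's own statement) =====
-- stated objective: faster
-- what changed: Replaces the per-window 3x3 rescan into a fresh 5-key dict with five (m+1)x(n+1) cumulative-count prefix grids built in one pass, each window then answered by the O(1) 2D inclusion-exclusion formula.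
import Mathlib
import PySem

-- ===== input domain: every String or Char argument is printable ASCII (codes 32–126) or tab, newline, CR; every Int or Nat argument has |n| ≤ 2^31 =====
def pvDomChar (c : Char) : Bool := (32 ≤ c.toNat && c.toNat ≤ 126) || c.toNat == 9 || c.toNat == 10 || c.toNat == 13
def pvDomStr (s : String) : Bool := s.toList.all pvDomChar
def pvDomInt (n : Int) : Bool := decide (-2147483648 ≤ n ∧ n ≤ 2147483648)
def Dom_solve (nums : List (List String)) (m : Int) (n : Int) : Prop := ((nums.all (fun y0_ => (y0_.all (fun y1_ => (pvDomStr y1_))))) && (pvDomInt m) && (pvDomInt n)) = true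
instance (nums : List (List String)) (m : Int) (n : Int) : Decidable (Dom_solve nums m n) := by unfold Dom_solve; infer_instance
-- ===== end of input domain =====

-- B replaces A's per-window 3x3 rescan into a fresh 5-key dict by five prefix-sum grids,
-- answering each window by O(1) 2D inclusion-exclusion (a constant-factor objective).

-- ===== PORT A =====
-- Python: "if nums[x][y] in xiaomi: xiaomi[nums[x][y]] += 1" on the running dict
def stepD (d : PySem.Dict String Int) (v : String) : PySem.Dict String Int :=
  if d.contains v then d.insert v (d.getD v 0 + 1) else d

-- Python: {'x': 0, 'i': 0, 'a': 0, 'o': 0, 'm': 0}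
def xiaomiInit : PySem.Dict String Int :=
  ((((PySem.Dict.empty.insert "x" 0).insert "i" 0).insert "a" 0).insert "o" 0).insert "m" 0

def solve (nums : List (List String)) (m : Int) (n : Int) : Int :=
  (PySem.List.pyRange 0 (m - 3 + 1) 1).foldl (fun count i =>
    (PySem.List.pyRange 0 (n - 3 + 1) 1).foldl (fun count j =>
      let xiaomi := (PySem.List.pyRange i (i + 3) 1).foldl (fun d x =>
        (PySem.List.pyRange j (j + 3) 1).foldl (fun d y =>
          stepD d (PySem.List.pyGetD (PySem.List.pyGetD nums x []) y "")) d) xiaomiInit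
      if xiaomi.getD "x" 0 ≥ 1 ∧ xiaomi.getD "i" 0 ≥ 2 ∧ xiaomi.getD "a" 0 ≥ 1 ∧
         xiaomi.getD "o" 0 ≥ 1 ∧ xiaomi.getD "m" 0 ≥ 1
      then count + 1 else count) count) 0

-- ===== PORT B =====
-- grid of cumulative counts of cells equal to c over nums[:i][:j], built row by row
def altPrefix (nums : List (List String)) (m : Int) (n : Int) (c : String) : List (List Int) :=
  (PySem.List.pyRange 0 m 1).foldl (fun grid i =>
    let row := PySem.List.pyGetD nums i []
    let prev := PySem.List.pyGetD grid i []
    let st := (PySem.List.pyRange 0 n 1).foldl (fun (st : List Int × Int) j =>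
      let run := if PySem.List.pyGetD row j "" == c then st.2 + 1 else st.2
      (st.1 ++ [PySem.List.pyGetD prev (j + 1) 0 + run], run)) ([(0 : Int)], (0 : Int))
    grid ++ [st.1]) [PySem.List.pyRepeat [(0 : Int)] (n + 1)]

-- 2D inclusion-exclusion window count out of a prefix grid
def altWin (g : List (List Int)) (i j : Int) : Int :=
  PySem.List.pyGetD (PySem.List.pyGetD g (i + 3) []) (j + 3) 0
    - PySem.List.pyGetD (PySem.List.pyGetD g i []) (j + 3) 0
    - PySem.List.pyGetD (PySem.List.pyGetD g (i + 3) []) j 0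
    + PySem.List.pyGetD (PySem.List.pyGetD g i []) j 0

def solve_alt (nums : List (List String)) (m : Int) (n : Int) : Int :=
  if m < 3 ∨ n < 3 then 0
  else
    let gx := altPrefix nums m n "x"
    let gi := altPrefix nums m n "i"
    let ga := altPrefix nums m n "a"
    let go := altPrefix nums m n "o"
    let gm := altPrefix nums m n "m"
    (PySem.List.pyRange 0 (m - 2) 1).foldl (fun count i =>
      (PySem.List.pyRange 0 (n - 2) 1).foldl (fun count j =>
        if altWin gx i j ≥ 1 ∧ altWin gi i j ≥ 2 ∧ altWin ga i j ≥ 1 ∧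
           altWin go i j ≥ 1 ∧ altWin gm i j ≥ 1
        then count + 1 else count) count) 0

-- ===== PRECONDITION & SPEC =====
-- Pre_ excludes exactly the inputs where A raises IndexError: when m,n ≥ 3 A reads every
-- cell nums[x][y] with x < m, y < n, so the first m rows must exist and have length ≥ n.
def Pre_solve (nums : List (List String)) (m : Int) (n : Int) : Prop :=
  (3 ≤ m ∧ 3 ≤ n) → (m ≤ (nums.length : Int) ∧ ∀ row ∈ nums.take m.toNat, n ≤ (row.length : Int))
instance (nums : List (List String)) (m : Int) (n : Int) : Decidable (Pre_solve nums m n) := by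
  unfold Pre_solve; infer_instance
def pvWitness_solve : List (List String) × Int × Int :=
  ([["x", "i", "i"], ["a", "o", "m"], ["i", "z", "q"]], 3, 3)
def Spec_solve (nums : List (List String)) (m : Int) (n : Int) (out : Int) : Prop := out = solve_alt nums m n
instance (nums : List (List String)) (m : Int) (n : Int) (out : Int) : Decidable (Spec_solve nums m n out) := by unfold Spec_solve; infer_instance

-- ===== CLAIM (what is proved, stated in full; the proofs are below) =====
def Claim_equal_solve : Prop := ∀ (nums : List (List String)) (m : Int) (n : Int), Dom_solve nums m n → Pre_solve nums m n → Spec_solve nums m n (solve nums m n)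

-- ===== LEMMAS AND PROOFS =====

-- spec-side closed forms: the cell at (x, y) (default "" off grid, which matches no tracked
-- key), its 0/1 indicator for key c, and row/rectangle prefix counts
def cellAt (nums : List (List String)) (x y : Nat) : String :=
  PySem.List.pyGetD (PySem.List.pyGetD nums (x : Int) []) (y : Int) ""

def indAt (nums : List (List String)) (c : String) (x y : Nat) : Int :=
  if cellAt nums x y == c then 1 else 0

def rowPre (nums : List (List String)) (c : String) (x t : Nat) : Int :=
  ∑ y ∈ Finset.range t, indAt nums c x y

def rectPre (nums : List (List String)) (c : String) (a b : Nat) : Int :=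
  ∑ x ∈ Finset.range a, rowPre nums c x b

theorem contains_stepD (d : PySem.Dict String Int) (v k : String) :
    (stepD d v).contains k = d.contains k := by
  unfold stepD
  split_ifs with h
  · rw [PySem.Dict.contains_insert]
    by_cases hk : k = v
    · subst hk; simp [h]
    · simp [hk]
  · rfl

theorem getD_stepD (d : PySem.Dict String Int) (v k : String) (h : d.contains k = true) :
    (stepD d v).getD k 0 = d.getD k 0 + (if v == k then 1 else 0) := by
  unfold stepD
  by_cases hk : k = v
  · subst hk; simp [h]
  · have hvk : ¬ (v == k) = true := by simp [beq_iff_eq]; exact fun hh => hk hh.symm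
    by_cases hv : d.contains v = true <;>
      simp [hv, PySem.Dict.getD_insert, hk, hvk]

theorem pyRange_three (a : Int) : PySem.List.pyRange a (a + 3) 1 = [a, a + 1, a + 2] := by
  rw [PySem.List.pyRange_one_cons (by omega), PySem.List.pyRange_one_cons (by omega),
      PySem.List.pyRange_one_cons (by omega), PySem.List.pyRange_one_eq_nil (by omega)]
  ring_nf

-- A's per-window dict loop adds, for each tracked key, its count over the nine window cells
theorem dictWindow (nums : List (List String)) (I J : Nat) (k : String)
    (d : PySem.Dict String Int) (h : d.contains k = true) :
    ((PySem.List.pyRange (I : Int) ((I : Int) + 3) 1).foldl (fun d x =>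
      (PySem.List.pyRange (J : Int) ((J : Int) + 3) 1).foldl (fun d y =>
        stepD d (PySem.List.pyGetD (PySem.List.pyGetD nums x []) y "")) d) d).getD k 0
      = d.getD k 0 + ∑ x ∈ Finset.range 3, ∑ y ∈ Finset.range 3, indAt nums k (I + x) (J + y) := by
  rw [pyRange_three, pyRange_three]
  simp only [List.foldl]
  simp only [getD_stepD, contains_stepD, h]
  simp only [indAt, cellAt, Finset.sum_range_succ, Finset.sum_range_zero]
  push_cast
  ring_nf

-- the inner row fold of altPrefix builds the (i+1)-st prefix row
theorem prefixRow (nums : List (List String)) (c : String) (i N : Nat) (t : Nat) (ht : t ≤ N) :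
    (PySem.List.pyRange 0 (t : Int) 1).foldl (fun (st : List Int × Int) j =>
      let run := if PySem.List.pyGetD (PySem.List.pyGetD nums (i : Int) []) j "" == c
                 then st.2 + 1 else st.2
      (st.1 ++ [PySem.List.pyGetD ((List.range (N + 1)).map (fun j' => rectPre nums c i j'))
                  (j + 1) 0 + run], run)) ([(0 : Int)], (0 : Int))
    = ((List.range (t + 1)).map (fun j => rectPre nums c (i + 1) j), rowPre nums c i t) := by
  induction t with
  | zero =>
      simp [PySem.List.pyRange_one_eq_nil, rectPre, rowPre]
  | succ t ih =>
      have h1 : ((t : Int) + 1) = (((t + 1 : Nat)) : Int) := by push_cast; ring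
      rw [show (((t + 1 : Nat)) : Int) = (t : Int) + 1 by push_cast; ring,
          PySem.List.pyRange_one_succ_right (by positivity), List.foldl_append]
      rw [ih (by omega)]
      simp only [List.foldl]
      have hget : PySem.List.pyGetD ((List.range (N + 1)).map (fun j' => rectPre nums c i j'))
          ((t : Int) + 1) 0 = rectPre nums c i (t + 1) := by
        rw [h1, PySem.List.pyGetD_natCast]
        simp [List.getD, Nat.lt_succ_of_le ht]
      rw [hget]
      have hrun : (if PySem.List.pyGetD (PySem.List.pyGetD nums (i : Int) []) (t : Int) "" == c
          then rowPre nums c i t + 1 else rowPre nums c i t) = rowPre nums c i (t + 1) := by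
        simp only [rowPre, Finset.sum_range_succ, indAt, cellAt]
        split_ifs <;> ring
      have hS : rectPre nums c i (t + 1) + rowPre nums c i (t + 1)
          = rectPre nums c (i + 1) (t + 1) := by
        simp only [rectPre, Finset.sum_range_succ]
      have hlist : (List.range (t + 1 + 1)).map (fun j => rectPre nums c (i + 1) j)
          = (List.range (t + 1)).map (fun j => rectPre nums c (i + 1) j)
            ++ [rectPre nums c (i + 1) (t + 1)] := by
        rw [List.range_succ, List.map_append]; rfl
      simp only [hrun, hS, hlist]

theorem map_range_succ_split {α : Type} (g : Nat → α) (t : Nat) :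
    (List.range (t + 1)).map g = (List.range t).map g ++ [g t] := by
  rw [List.range_succ, List.map_append]; rfl

theorem prefixGridAux (nums : List (List String)) (c : String) (N : Nat) (t : Nat) :
    (PySem.List.pyRange 0 (t : Int) 1).foldl (fun grid i =>
      let row := PySem.List.pyGetD nums i []
      let prev := PySem.List.pyGetD grid i []
      let st := (PySem.List.pyRange 0 (N : Int) 1).foldl (fun (st : List Int × Int) j =>
        let run := if PySem.List.pyGetD row j "" == c then st.2 + 1 else st.2
        (st.1 ++ [PySem.List.pyGetD prev (j + 1) 0 + run], run)) ([(0 : Int)], (0 : Int))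
      grid ++ [st.1]) [PySem.List.pyRepeat [(0 : Int)] ((N : Int) + 1)]
    = (List.range (t + 1)).map (fun i => (List.range (N + 1)).map (fun j => rectPre nums c i j)) := by
  induction t with
  | zero =>
      have h0 : PySem.List.pyRange 0 ((0 : Nat) : Int) 1 = [] :=
        PySem.List.pyRange_one_eq_nil (by omega)
      rw [h0]
      simp only [List.foldl]
      congr 1
      rw [PySem.List.pyRepeat_singleton, show ((N : Int) + 1).toNat = N + 1 by omega]
      symm
      rw [List.eq_replicate_iff]
      constructor
      · simp
      · intro b hb
        simp only [List.mem_map, List.mem_range] at hb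
        obtain ⟨j, -, rfl⟩ := hb
        simp [rectPre]
  | succ t ih =>
      rw [show (((t + 1 : Nat)) : Int) = (t : Int) + 1 by push_cast; ring,
          PySem.List.pyRange_one_succ_right (by positivity), List.foldl_append]
      rw [ih]
      simp only [List.foldl]
      have hprev : PySem.List.pyGetD
          ((List.range (t + 1)).map (fun i => (List.range (N + 1)).map (fun j => rectPre nums c i j)))
          (t : Int) [] = (List.range (N + 1)).map (fun j => rectPre nums c t j) := by
        rw [PySem.List.pyGetD_natCast]
        simp [List.getD]
      rw [hprev, prefixRow nums c t N N le_rfl,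
          map_range_succ_split (fun i => (List.range (N + 1)).map (fun j => rectPre nums c i j)) (t + 1)]

theorem prefixGrid (nums : List (List String)) (c : String) (M N : Nat) :
    altPrefix nums (M : Int) (N : Int) c
    = (List.range (M + 1)).map (fun i => (List.range (N + 1)).map (fun j => rectPre nums c i j)) := by
  rw [altPrefix]
  exact prefixGridAux nums c N M

-- inclusion-exclusion: a 3x3 window out of the prefix grid is the 9-cell indicator sum
theorem winB (nums : List (List String)) (c : String) (M N I J : Nat)
    (hI : I + 3 ≤ M) (hJ : J + 3 ≤ N) :
    altWin ((List.range (M + 1)).map (fun i => (List.range (N + 1)).map (fun j => rectPre nums c i j)))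
        (I : Int) (J : Int)
    = ∑ x ∈ Finset.range 3, ∑ y ∈ Finset.range 3, indAt nums c (I + x) (J + y) := by
  have hrow : ∀ a : Nat, a < M + 1 → PySem.List.pyGetD
      ((List.range (M + 1)).map (fun i => (List.range (N + 1)).map (fun j => rectPre nums c i j)))
      (a : Int) [] = (List.range (N + 1)).map (fun j => rectPre nums c a j) := by
    intro a ha
    rw [PySem.List.pyGetD_natCast]
    simp [List.getD, ha]
  have hcol : ∀ a b : Nat, b < N + 1 → PySem.List.pyGetD
      ((List.range (N + 1)).map (fun j => rectPre nums c a j)) (b : Int) 0 = rectPre nums c a b := by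
    intro a b hb
    rw [PySem.List.pyGetD_natCast]
    simp [List.getD, hb]
  rw [altWin]
  rw [show (I : Int) + 3 = ((I + 3 : Nat) : Int) by push_cast; ring,
      show (J : Int) + 3 = ((J + 3 : Nat) : Int) by push_cast; ring]
  rw [hrow (I + 3) (by omega), hrow I (by omega),
      hcol (I + 3) (J + 3) (by omega), hcol (I + 3) J (by omega),
      hcol I (J + 3) (by omega), hcol I J (by omega)]
  simp only [rectPre, rowPre, Finset.sum_add_distrib, Finset.sum_range_succ,
    Finset.sum_range_zero]
  ring_nf

-- the two programs agree on every non-degenerate size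
theorem main_eq (nums : List (List String)) (m n : Int) (hm : 3 ≤ m) (hn : 3 ≤ n) :
    solve nums m n = solve_alt nums m n := by
  have hmM : m = ((m.toNat : Nat) : Int) := by omega
  have hnN : n = ((n.toNat : Nat) : Int) := by omega
  set M := m.toNat with hM
  set N := n.toNat with hN
  rw [solve, solve_alt, if_neg (by omega)]
  simp only
  simp only [show m - 3 + 1 = m - 2 from by ring, show n - 3 + 1 = n - 2 from by ring]
  rw [hmM, hnN]
  rw [prefixGrid, prefixGrid, prefixGrid, prefixGrid, prefixGrid]
  apply PySem.List.foldl_congr_mem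
  intro acc i hi
  apply PySem.List.foldl_congr_mem
  intro acc2 j hj
  rw [PySem.List.mem_pyRange_one] at hi hj
  have hiI : i = ((i.toNat : Nat) : Int) := by omega
  have hjJ : j = ((j.toNat : Nat) : Int) := by omega
  set I := i.toNat with hI
  set J := j.toNat with hJ
  have hIM : I + 3 ≤ M := by omega
  have hJN : J + 3 ≤ N := by omega
  rw [hiI, hjJ]
  have hx := dictWindow nums I J "x" xiaomiInit (by decide)
  have hi' := dictWindow nums I J "i" xiaomiInit (by decide)
  have ha := dictWindow nums I J "a" xiaomiInit (by decide)
  have ho := dictWindow nums I J "o" xiaomiInit (by decide)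
  have hm' := dictWindow nums I J "m" xiaomiInit (by decide)
  simp only [show xiaomiInit.getD "x" 0 = 0 from by decide,
    show xiaomiInit.getD "i" 0 = 0 from by decide,
    show xiaomiInit.getD "a" 0 = 0 from by decide,
    show xiaomiInit.getD "o" 0 = 0 from by decide,
    show xiaomiInit.getD "m" 0 = 0 from by decide, zero_add] at hx hi' ha ho hm'
  rw [hx, hi', ha, ho, hm',
      winB nums "x" M N I J hIM hJN, winB nums "i" M N I J hIM hJN,
      winB nums "a" M N I J hIM hJN, winB nums "o" M N I J hIM hJN,
      winB nums "m" M N I J hIM hJN]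

-- ===== VERDICT (by name: the statement is the Claim_ definition above) =====
theorem solve_spec : Claim_equal_solve := by
  intro nums m n _ _
  unfold Spec_solve
  by_cases hdeg : m < 3 ∨ n < 3
  · rw [solve_alt, if_pos hdeg, solve]
    rcases hdeg with hdeg | hdeg
    · rw [show PySem.List.pyRange 0 (m - 3 + 1) 1 = [] from
        PySem.List.pyRange_one_eq_nil (by omega)]
      rfl
    · simp only [show PySem.List.pyRange 0 (n - 3 + 1) 1 = [] from
        PySem.List.pyRange_one_eq_nil (by omega), List.foldl_nil]
      exact PySem.List.foldl_ignore _ _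
  · rw [not_or] at hdeg
    exact main_eq nums m n (by omega) (by omega)
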